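-- pv_equiv track=rewrite | github.com/helgithorskarp/wordleTUI | wordleEngine.py | generateHint
-- ===== SOURCE A (Python) =====
-- def generateHint(secret: str, guess: str) -> str:
--     '''Generates a wordle hint, C is in correct position, c not correct position, - not in word'''
--     secret, guess = secret.lower(), guess.lower()
--     hint = ['-'] * len(secret)
--     letterCount = {}
--
--     for ch in secret: # dictionary that counts how many times each letter appears
--         if ch in letterCount:
--             letterCount[ch] += 1
--         else:
--             letterCount[ch] = 1
--
--     for i in range(len(secret)): # loop trough word and add a upper case C if letter is in correct position and also subtract from the dictionary
--         if guess[i] == secret[i]: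
--             hint[i] = 'C'
--             letterCount[guess[i]] -= 1
--
--     for i in range(len(secret)): # loop trough word again, add a lowercase c iff word is in secret and the dictionary number for letter is larger than 0
--         if hint[i] != 'C' and guess[i] in letterCount and letterCount[guess[i]] > 0:
--             hint[i] = 'c'
--             letterCount[guess[i]] -= 1
--
--     # ---- Here below I turn the hint genereated into a hint that has colours----
--     GREEN = "\033[92m"
--     YELLOW = "\033[93m"
--     RESET = "\033[0m"
--
--     coloredHint = ""
--     for ch in hint:
--         if ch == 'C':
--             coloredHint += f"{GREEN}C{RESET}"
--         elif ch == 'c':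
--             coloredHint += f"{YELLOW}c{RESET}"
--         else:
--             coloredHint += ch
--
--     return coloredHint
-- ===== SOURCE B (Python) =====
-- def generateHint(secret: str, guess: str) -> str:
--     '''Wordle hint: each position is decided independently by counting, no mutable counter state.'''
--     secret, guess = secret.lower(), guess.lower()
--     n = len(secret)
--     GREEN = "\033[92m"
--     YELLOW = "\033[93m"
--     RESET = "\033[0m"
--     out = []
--     for i in range(n):
--         c = guess[i]
--         if c == secret[i]:
--             out.append(f"{GREEN}C{RESET}")
--         else:
--             # letters of the secret at non-green positions equal to c
--             avail = sum(1 for j in range(n) if secret[j] == c and guess[j] != secret[j])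
--             # earlier non-green guess positions with the same letter (they consume first)
--             used = sum(1 for j in range(i) if guess[j] == c and guess[j] != secret[j])
--             out.append(f"{YELLOW}c{RESET}" if used < avail else '-')
--     return ''.join(out)
-- ===== Notes on version B (the rewrite author's own statement) =====
-- stated objective: alternative
-- what changed: B decides each position independently by a counting characterization -- a position is yellow iff the number of earlier non-green occurrences of that guess letter is smaller than the number of non-green secret positions holding that letter -- so the mutable letter-count dictionary and its two decrementing passes disappear entirely; the colored string is built in the same single pass with ''.join.
import Mathlib
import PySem

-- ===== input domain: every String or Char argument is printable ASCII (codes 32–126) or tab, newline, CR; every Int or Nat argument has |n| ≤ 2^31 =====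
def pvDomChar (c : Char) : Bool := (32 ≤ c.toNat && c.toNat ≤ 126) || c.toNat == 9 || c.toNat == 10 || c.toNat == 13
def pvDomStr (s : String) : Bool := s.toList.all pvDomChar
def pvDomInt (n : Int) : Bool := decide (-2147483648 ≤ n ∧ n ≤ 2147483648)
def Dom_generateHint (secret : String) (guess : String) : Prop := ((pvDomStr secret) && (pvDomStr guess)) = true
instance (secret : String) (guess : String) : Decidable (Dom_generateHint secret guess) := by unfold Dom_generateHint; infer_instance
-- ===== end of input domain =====

-- B replaces A's mutable letter-count dictionary and its two decrementing passes by a stateless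
-- per-position counting rule (yellow iff earlier non-green same-letter guesses < non-green secret
-- occurrences); objective: alternative. Equivalence proved on Pre_ (guess at least as long as secret).

-- ===== PORT A =====
def generateHint (secret : String) (guess : String) : String :=
  let s := PySem.Chars.lower secret.toList
  let g := PySem.Chars.lower guess.toList
  let hint := List.replicate s.length '-'
  let letterCount := s.foldl (fun (d : PySem.Dict Char Int) ch =>
      if d.contains ch then d.modify ch 0 (· + 1) else d.insert ch 1)
    PySem.Dict.empty
  let st1 := (PySem.List.pyRange 0 (s.length : Int)).foldl
    (fun (st : List Char × PySem.Dict Char Int) i =>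
      if PySem.List.pyGetD g i ' ' = PySem.List.pyGetD s i ' ' then
        (PySem.List.pySetD st.1 i 'C',
         st.2.modify (PySem.List.pyGetD g i ' ') 0 (· - 1))
      else st) (hint, letterCount)
  let st2 := (PySem.List.pyRange 0 (s.length : Int)).foldl
    (fun (st : List Char × PySem.Dict Char Int) i =>
      if PySem.List.pyGetD st.1 i ' ' ≠ 'C' ∧
         st.2.contains (PySem.List.pyGetD g i ' ') = true ∧
         0 < st.2.getD (PySem.List.pyGetD g i ' ') 0 then
        (PySem.List.pySetD st.1 i 'c',
         st.2.modify (PySem.List.pyGetD g i ' ') 0 (· - 1))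
      else st) st1
  let coloredHint := st2.1.foldl (fun (acc : List Char) ch =>
      if ch = 'C' then acc ++ "\x1b[92mC\x1b[0m".toList
      else if ch = 'c' then acc ++ "\x1b[93mc\x1b[0m".toList
      else acc ++ [ch]) []
  String.ofList coloredHint

-- ===== PORT B =====
def generateHint_alt (secret : String) (guess : String) : String :=
  let s := PySem.Chars.lower secret.toList
  let g := PySem.Chars.lower guess.toList
  let n := s.length
  let out := (PySem.List.pyRange 0 (n : Int)).foldl
    (fun (out : List (List Char)) i =>
      let c := PySem.List.pyGetD g i ' '
      if c = PySem.List.pyGetD s i ' ' then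
        out ++ ["\x1b[92mC\x1b[0m".toList]
      else
        let avail := (PySem.List.pyRange 0 (n : Int)).foldl
          (fun (acc : Int) j =>
            if PySem.List.pyGetD s j ' ' = c ∧
               PySem.List.pyGetD g j ' ' ≠ PySem.List.pyGetD s j ' ' then acc + 1 else acc) 0
        let used := (PySem.List.pyRange 0 i).foldl
          (fun (acc : Int) j =>
            if PySem.List.pyGetD g j ' ' = c ∧
               PySem.List.pyGetD g j ' ' ≠ PySem.List.pyGetD s j ' ' then acc + 1 else acc) 0
        out ++ [if used < avail then "\x1b[93mc\x1b[0m".toList else ['-']]) []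
  String.ofList out.flatten

-- ===== PRECONDITION & SPEC =====
-- Both A and B index guess[i] for every i < len(secret); Python raises IndexError
-- when the guess is shorter than the secret, so exactly those inputs are excluded.
def Pre_generateHint (secret : String) (guess : String) : Prop :=
  secret.toList.length ≤ guess.toList.length
instance (secret : String) (guess : String) : Decidable (Pre_generateHint secret guess) := by
  unfold Pre_generateHint; infer_instance
def pvWitness_generateHint : String × String := ("crane", "caaec")

def Spec_generateHint (secret : String) (guess : String) (out : String) : Prop :=
  out = generateHint_alt secret guess
instance (secret : String) (guess : String) (out : String) : Decidable (Spec_generateHint secret guess out) := by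
  unfold Spec_generateHint; infer_instance

-- ===== CLAIM (what is proved, stated in full; the proofs are below) =====
def Claim_equal_generateHint : Prop := ∀ (secret : String) (guess : String), Dom_generateHint secret guess → Pre_generateHint secret guess → Spec_generateHint secret guess (generateHint secret guess)

-- ===== LEMMAS AND PROOFS =====

-- Characterization used by the proof: green char, leftover count, earlier-consumption count, final char.
def pvGreen (S G : List Char) (j : ℕ) : Char :=
  if G.getD j ' ' = S.getD j ' ' then 'C' else '-'
def pvAvail (S G : List Char) (c : Char) : ℕ :=
  (List.range S.length).countP (fun j => S.getD j ' ' = c ∧ G.getD j ' ' ≠ S.getD j ' ')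
def pvUsed (S G : List Char) (i : ℕ) (c : Char) : ℕ :=
  (List.range i).countP (fun j => G.getD j ' ' = c ∧ G.getD j ' ' ≠ S.getD j ' ')
def pvFinal (S G : List Char) (i : ℕ) : Char :=
  if G.getD i ' ' = S.getD i ' ' then 'C'
  else if pvUsed S G i (G.getD i ' ') < pvAvail S G (G.getD i ' ') then 'c' else '-'
def pvColor (ch : Char) : List Char :=
  if ch = 'C' then "\x1b[92mC\x1b[0m".toList
  else if ch = 'c' then "\x1b[93mc\x1b[0m".toList
  else [ch]

-- count of a letter = countP over indices
theorem pvCount_eq_countP_range (S : List Char) (c : Char) :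
    S.count c = (List.range S.length).countP (fun j => S.getD j ' ' = c) := by
  induction S with
  | nil => simp
  | cons x t ih =>
    simp only [List.length_cons, List.range_succ_eq_map, List.countP_cons, List.countP_map]
    simp only [List.count_cons, ih]
    have : (List.range t.length).countP ((fun j => decide ((x :: t).getD j ' ' = c)) ∘ Nat.succ)
        = (List.range t.length).countP (fun j => decide (t.getD j ' ' = c)) := by
      apply List.countP_congr; intro j _; simp [Function.comp, List.getD]
    rw [this]
    by_cases hx : x = c <;> simp [hx, beq_iff_eq, Ne.symm]

-- countP split along a second test
theorem pvCountP_split {α : Type} (l : List α) (p q : α → Prop)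
    [DecidablePred p] [DecidablePred q] :
    l.countP (fun x => p x ∧ ¬ q x) + l.countP (fun x => p x ∧ q x)
      = l.countP (fun x => p x) := by
  induction l with
  | nil => simp
  | cons x t ih =>
    simp only [List.countP_cons, ← ih]
    by_cases hp : p x <;> by_cases hq : q x <;> simp [hp, hq] <;> omega

-- set on a map over range
theorem pvSet_map_range {α : Type} (n a : ℕ) (f : ℕ → α) (v : α) (_ha : a < n) :
    ((List.range n).map f).set a v
      = (List.range n).map (fun j => if j = a then v else f j) := by
  apply List.ext_getElem
  · simp
  · intro i h1 h2
    simp only [List.getElem_set, List.getElem_map, List.getElem_range]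
    simp at h1
    split <;> simp_all [eq_comm]

-- A's counting loop adds the letter counts of the traversed list (getD-wise).
theorem pvBuild_count (S : List Char) : ∀ (d : PySem.Dict Char Int) (c : Char),
    (S.foldl (fun (d : PySem.Dict Char Int) ch =>
        if d.contains ch then d.modify ch 0 (· + 1) else d.insert ch 1) d).getD c 0
      = d.getD c 0 + (S.count c : Int) := by
  induction S with
  | nil => intro d c; simp
  | cons x t ih =>
    intro d c
    simp only [List.foldl_cons, ih, List.count_cons]
    by_cases hx : d.contains x
    · simp only [hx, if_true]
      rw [PySem.Dict.getD_modify]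
      by_cases hc : c = x
      · subst hc; simp; omega
      · simp [hc, beq_iff_eq, Ne.symm hc]
    · rw [if_neg hx, PySem.Dict.getD_insert]
      by_cases hc : c = x
      · subst hc
        have hx' : d.contains c = false := by simpa using hx
        rw [PySem.Dict.getD_of_not_contains d 0 hx']
        simp; omega
      · simp [hc, beq_iff_eq, Ne.symm hc]

-- A's green pass, from index a on: the hint and the dict, in closed form.
theorem pvGreenLoop (S G : List Char) (_hg : S.length ≤ G.length) :
    ∀ (k a : ℕ), a + k = S.length →
    ∀ (f : ℕ → Char) (d : PySem.Dict Char Int),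
    (((PySem.List.pyRange (a : Int) (S.length : Int)).foldl
      (fun (st : List Char × PySem.Dict Char Int) i =>
        if PySem.List.pyGetD G i ' ' = PySem.List.pyGetD S i ' ' then
          (PySem.List.pySetD st.1 i 'C',
           st.2.modify (PySem.List.pyGetD G i ' ') 0 (· - 1))
        else st) ((List.range S.length).map f, d)).1
      = (List.range S.length).map
          (fun j => if a ≤ j ∧ G.getD j ' ' = S.getD j ' ' then 'C' else f j))
    ∧ ∀ c,
      ((PySem.List.pyRange (a : Int) (S.length : Int)).foldl
        (fun (st : List Char × PySem.Dict Char Int) i =>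
          if PySem.List.pyGetD G i ' ' = PySem.List.pyGetD S i ' ' then
            (PySem.List.pySetD st.1 i 'C',
             st.2.modify (PySem.List.pyGetD G i ' ') 0 (· - 1))
          else st) ((List.range S.length).map f, d)).2.getD c 0
      = d.getD c 0 - ((((List.range S.length).drop a).countP
          (fun j => S.getD j ' ' = c ∧ G.getD j ' ' = S.getD j ' ')) : Int) := by
  intro k
  induction k with
  | zero =>
    intro a ha f d
    have hnil : PySem.List.pyRange (a : Int) (S.length : Int) 1 = [] :=
      PySem.List.pyRange_one_eq_nil (by omega)
    rw [hnil]
    constructor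
    · simp only [List.foldl_nil]
      apply List.map_congr_left
      intro j hj
      simp only [List.mem_range] at hj
      rw [if_neg (by omega)]
    · intro c
      have : (List.range S.length).drop a = [] := by
        apply List.drop_eq_nil_of_le; simp; omega
      simp [this]
  | succ k ih =>
    intro a ha f d
    have haS : a < S.length := by omega
    have hcons : PySem.List.pyRange (a : Int) (S.length : Int) 1
        = (a : Int) :: PySem.List.pyRange ((a : Int) + 1) (S.length : Int) 1 :=
      PySem.List.pyRange_one_cons (by exact_mod_cast haS)
    have hcast : ((a : Int) + 1) = ((a + 1 : ℕ) : Int) := by push_cast; ring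
    have hSg : PySem.List.pyGetD S (a : Int) ' ' = S.getD a ' ' := PySem.List.pyGetD_natCast S a ' '
    have hGg : PySem.List.pyGetD G (a : Int) ' ' = G.getD a ' ' := PySem.List.pyGetD_natCast G a ' '
    have hdrop : (List.range S.length).drop a = a :: (List.range S.length).drop (a + 1) := by
      rw [List.drop_eq_getElem_cons (by simpa using haS)]
      simp
    rw [hcons]
    simp only [List.foldl_cons, hSg, hGg]
    by_cases hEq : G.getD a ' ' = S.getD a ' '
    · rw [if_pos hEq]
      have hset : PySem.List.pySetD ((List.range S.length).map f) (a : Int) 'C'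
          = (List.range S.length).map (fun j => if j = a then 'C' else f j) := by
        rw [PySem.List.pySetD_natCast, pvSet_map_range S.length a f 'C' haS]
      rw [hcast]
      obtain ⟨ih1, ih2⟩ := ih (a + 1) (by omega)
        (fun j => if j = a then 'C' else f j) (d.modify (G.getD a ' ') 0 (· - 1))
      constructor
      · simp only [hset, ih1]
        apply List.map_congr_left
        intro j hj
        simp only [List.mem_range] at hj
        by_cases hja : j = a
        · rw [hja, if_neg (by omega), if_pos rfl, if_pos ⟨le_refl a, hEq⟩]
        · by_cases hle : a + 1 ≤ j
          · by_cases hgr : G.getD j ' ' = S.getD j ' '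
            · rw [if_pos ⟨hle, hgr⟩, if_pos ⟨by omega, hgr⟩]
            · rw [if_neg (by rintro ⟨_, h⟩; exact hgr h), if_neg hja,
                  if_neg (by rintro ⟨_, h⟩; exact hgr h)]
          · rw [if_neg (by rintro ⟨h1, _⟩; omega), if_neg hja,
                if_neg (by rintro ⟨h1, _⟩; omega)]
      · intro c
        simp only [hset, ih2 c]
        rw [PySem.Dict.getD_modify]
        rw [hdrop, List.countP_cons]
        by_cases hc : c = G.getD a ' '
        · rw [if_pos hc]
          have : (decide (S.getD a ' ' = c ∧ G.getD a ' ' = S.getD a ' ')) = true := by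
            have hc' := hc
            rw [hEq] at hc'
            simp only [decide_eq_true_eq]
            exact ⟨hc'.symm, hEq⟩
          rw [this, hc]
          push_cast
          simp
          try omega
        · rw [if_neg hc]
          have : (decide (S.getD a ' ' = c ∧ G.getD a ' ' = S.getD a ' ')) = false := by
            simp only [decide_eq_false_iff_not]
            rintro ⟨h1, _⟩
            exact hc (hEq.trans h1).symm
          rw [this]
          push_cast; ring
    · rw [if_neg hEq, hcast]
      obtain ⟨ih1, ih2⟩ := ih (a + 1) (by omega) f d
      constructor
      · simp only [ih1]
        apply List.map_congr_left
        intro j hj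
        simp only [List.mem_range] at hj
        by_cases hja : j = a
        · subst hja
          rw [if_neg (by rintro ⟨h1, _⟩; omega), if_neg (by rintro ⟨_, h⟩; exact hEq h)]
        · by_cases hle : a + 1 ≤ j
          · by_cases hgr : G.getD j ' ' = S.getD j ' '
            · rw [if_pos ⟨hle, hgr⟩, if_pos ⟨by omega, hgr⟩]
            · rw [if_neg (by rintro ⟨_, h⟩; exact hgr h), if_neg (by rintro ⟨_, h⟩; exact hgr h)]
          · rw [if_neg (by rintro ⟨h1, _⟩; omega), if_neg (by rintro ⟨h1, _⟩; omega)]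
      · intro c
        simp only [ih2 c]
        rw [hdrop, List.countP_cons]
        have : (decide (S.getD a ' ' = c ∧ G.getD a ' ' = S.getD a ' ')) = false := by
          simp only [decide_eq_false_iff_not]
          rintro ⟨_, h⟩
          exact hEq h
        rw [this]
        push_cast; ring

-- A's yellow pass from index a, given the invariant state, produces the final hint.
theorem pvYellowLoop (S G : List Char) (_hg : S.length ≤ G.length) :
    ∀ (k a : ℕ), a + k = S.length →
    ∀ (d : PySem.Dict Char Int),
    (∀ c, d.getD c 0 = max ((pvAvail S G c : Int) - (pvUsed S G a c : Int)) 0) →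
    ((PySem.List.pyRange (a : Int) (S.length : Int)).foldl
      (fun (st : List Char × PySem.Dict Char Int) i =>
        if PySem.List.pyGetD st.1 i ' ' ≠ 'C' ∧
           st.2.contains (PySem.List.pyGetD G i ' ') = true ∧
           0 < st.2.getD (PySem.List.pyGetD G i ' ') 0 then
          (PySem.List.pySetD st.1 i 'c',
           st.2.modify (PySem.List.pyGetD G i ' ') 0 (· - 1))
        else st)
      ((List.range S.length).map (fun j => if j < a then pvFinal S G j else pvGreen S G j), d)).1
    = (List.range S.length).map (pvFinal S G) := by
  intro k
  induction k with
  | zero =>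
    intro a ha d _hd
    rw [PySem.List.pyRange_one_eq_nil (by omega)]
    simp only [List.foldl_nil]
    apply List.map_congr_left
    intro j hj
    simp only [List.mem_range] at hj
    rw [if_pos (by omega)]
  | succ k ih =>
    intro a ha d hd
    have haS : a < S.length := by omega
    have hcons : PySem.List.pyRange (a : Int) (S.length : Int) 1
        = (a : Int) :: PySem.List.pyRange ((a : Int) + 1) (S.length : Int) 1 :=
      PySem.List.pyRange_one_cons (by exact_mod_cast haS)
    have hcast : ((a : Int) + 1) = ((a + 1 : ℕ) : Int) := by push_cast; ring
    have hGg : PySem.List.pyGetD G (a : Int) ' ' = G.getD a ' ' := PySem.List.pyGetD_natCast G a ' '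
    have hHg : PySem.List.pyGetD
        ((List.range S.length).map (fun j => if j < a then pvFinal S G j else pvGreen S G j)) (a : Int) ' '
        = pvGreen S G a := by
      rw [PySem.List.pyGetD_natCast, PySem.List.getD_map_range _ _ _ _ haS, if_neg (by omega)]
    set c0 := G.getD a ' ' with hc0
    have hused : ∀ c, pvUsed S G (a + 1) c
        = pvUsed S G a c + if G.getD a ' ' = c ∧ G.getD a ' ' ≠ S.getD a ' ' then 1 else 0 := by
      intro c
      unfold pvUsed
      rw [List.range_succ, List.countP_append]
      simp
    rw [hcons]
    simp only [List.foldl_cons, hGg, hHg]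
    by_cases hP : ¬ (G.getD a ' ' = S.getD a ' ') ∧ pvUsed S G a c0 < pvAvail S G c0
    · have hguard : pvGreen S G a ≠ 'C' ∧
          d.contains c0 = true ∧ 0 < d.getD c0 0 := by
        refine ⟨?_, ?_, ?_⟩
        · unfold pvGreen; rw [if_neg hP.1]; decide
        · by_contra hnc
          have : d.contains c0 = false := by
            cases h : d.contains c0 with
            | false => rfl
            | true => exact absurd h hnc
          have h0 := PySem.Dict.getD_of_not_contains d 0 this
          have := hd c0
          rw [h0] at this
          omega
        · rw [hd c0]; omega
      rw [if_pos hguard]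
      have hset : PySem.List.pySetD
          ((List.range S.length).map (fun j => if j < a then pvFinal S G j else pvGreen S G j)) (a : Int) 'c'
          = (List.range S.length).map
              (fun j => if j < a + 1 then pvFinal S G j else pvGreen S G j) := by
        rw [PySem.List.pySetD_natCast,
            pvSet_map_range S.length a (fun j => if j < a then pvFinal S G j else pvGreen S G j) 'c' haS]
        apply List.map_congr_left
        intro j hj
        simp only [List.mem_range] at hj
        by_cases hja : j = a
        · rw [if_pos hja, hja, if_pos (by omega)]
          unfold pvFinal
          rw [if_neg hP.1, if_pos hP.2]
        · rw [if_neg hja]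
          by_cases hlt : j < a
          · rw [if_pos hlt, if_pos (by omega)]
          · rw [if_neg hlt, if_neg (by omega)]
      rw [hset, hcast]
      apply ih (a + 1) (by omega)
      intro c
      rw [PySem.Dict.getD_modify, hused c]
      by_cases hc : c = c0
      · rw [if_pos hc, hd c0, hc,
            if_pos ⟨rfl, hP.1⟩]
        have := hP.2
        omega
      · rw [if_neg hc, hd c,
            if_neg (by rintro ⟨h1, _⟩; exact hc (h1.symm))]
        omega
    · have hguard : ¬ (pvGreen S G a ≠ 'C' ∧
          d.contains c0 = true ∧ 0 < d.getD c0 0) := by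
        rintro ⟨h1, _, h3⟩
        apply hP
        constructor
        · intro hgr
          apply h1
          unfold pvGreen
          rw [if_pos hgr]
        · rw [hd c0] at h3; omega
      rw [if_neg hguard]
      have hlist : (List.range S.length).map (fun j => if j < a then pvFinal S G j else pvGreen S G j)
          = (List.range S.length).map (fun j => if j < a + 1 then pvFinal S G j else pvGreen S G j) := by
        apply List.map_congr_left
        intro j hj
        simp only [List.mem_range] at hj
        by_cases hja : j = a
        · rw [hja, if_neg (by omega), if_pos (by omega)]
          by_cases hgr : G.getD a ' ' = S.getD a ' '
          · unfold pvFinal pvGreen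
            rw [if_pos hgr, if_pos hgr]
          · have hge : ¬ pvUsed S G a c0 < pvAvail S G c0 := fun h => hP ⟨hgr, h⟩
            unfold pvFinal pvGreen
            rw [if_neg hgr, if_neg hgr, if_neg (by rw [← hc0]; exact hge)]
        · by_cases hlt : j < a
          · rw [if_pos hlt, if_pos (by omega)]
          · rw [if_neg hlt, if_neg (by omega)]
      rw [hlist, hcast]
      apply ih (a + 1) (by omega)
      intro c
      rw [hd c, hused c]
      by_cases hgr : G.getD a ' ' = S.getD a ' '
      · rw [if_neg (by rintro ⟨_, h2⟩; exact h2 hgr)]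
        push_cast; omega
      · have hge : ¬ pvUsed S G a c0 < pvAvail S G c0 := fun h => hP ⟨hgr, h⟩
        by_cases hc : G.getD a ' ' = c
        · rw [if_pos ⟨hc, hgr⟩]
          rw [← hc]
          rw [← hc0] at *
          omega
        · rw [if_neg (by rintro ⟨h1, _⟩; exact hc h1)]
          push_cast; omega

-- A's colorizing concatenation loop is the flattening of the per-character chunks.
theorem pvColor_eq (l : List Char) : ∀ (acc : List Char),
    l.foldl (fun (acc : List Char) ch =>
      if ch = 'C' then acc ++ "\x1b[92mC\x1b[0m".toList
      else if ch = 'c' then acc ++ "\x1b[93mc\x1b[0m".toList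
      else acc ++ [ch]) acc
    = acc ++ (l.map pvColor).flatten := by
  induction l with
  | nil => intro acc; simp
  | cons x t ih =>
    intro acc
    simp only [List.foldl_cons, List.map_cons, List.flatten_cons, ih, pvColor]
    split_ifs <;> simp

-- B's chunk list is the colorized final hint.
theorem pvBList (S G : List Char) (_hg : S.length ≤ G.length) :
    ((PySem.List.pyRange 0 (S.length : Int)).foldl
      (fun (out : List (List Char)) i =>
        let c := PySem.List.pyGetD G i ' '
        if c = PySem.List.pyGetD S i ' ' then
          out ++ ["\x1b[92mC\x1b[0m".toList]
        else
          let avail := (PySem.List.pyRange 0 (S.length : Int)).foldl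
            (fun (acc : Int) j =>
              if PySem.List.pyGetD S j ' ' = c ∧
                 PySem.List.pyGetD G j ' ' ≠ PySem.List.pyGetD S j ' ' then acc + 1 else acc) 0
          let used := (PySem.List.pyRange 0 i).foldl
            (fun (acc : Int) j =>
              if PySem.List.pyGetD G j ' ' = c ∧
                 PySem.List.pyGetD G j ' ' ≠ PySem.List.pyGetD S j ' ' then acc + 1 else acc) 0
          out ++ [if used < avail then "\x1b[93mc\x1b[0m".toList else ['-']]) [])
    = (List.range S.length).map (fun j => pvColor (pvFinal S G j)) := by
  have hbody : (fun (out : List (List Char)) (i : Int) =>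
      let c := PySem.List.pyGetD G i ' '
      if c = PySem.List.pyGetD S i ' ' then
        out ++ ["\x1b[92mC\x1b[0m".toList]
      else
        let avail := (PySem.List.pyRange 0 (S.length : Int)).foldl
          (fun (acc : Int) j =>
            if PySem.List.pyGetD S j ' ' = c ∧
               PySem.List.pyGetD G j ' ' ≠ PySem.List.pyGetD S j ' ' then acc + 1 else acc) 0
        let used := (PySem.List.pyRange 0 i).foldl
          (fun (acc : Int) j =>
            if PySem.List.pyGetD G j ' ' = c ∧
               PySem.List.pyGetD G j ' ' ≠ PySem.List.pyGetD S j ' ' then acc + 1 else acc) 0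
        out ++ [if used < avail then "\x1b[93mc\x1b[0m".toList else ['-']])
      = (fun (out : List (List Char)) (i : Int) => out ++ [
          let c := PySem.List.pyGetD G i ' '
          if c = PySem.List.pyGetD S i ' ' then
            "\x1b[92mC\x1b[0m".toList
          else
            if (PySem.List.pyRange 0 i).foldl
                (fun (acc : Int) j =>
                  if PySem.List.pyGetD G j ' ' = c ∧
                     PySem.List.pyGetD G j ' ' ≠ PySem.List.pyGetD S j ' ' then acc + 1 else acc) 0
               < (PySem.List.pyRange 0 (S.length : Int)).foldl
                (fun (acc : Int) j =>
                  if PySem.List.pyGetD S j ' ' = c ∧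
                     PySem.List.pyGetD G j ' ' ≠ PySem.List.pyGetD S j ' ' then acc + 1 else acc) 0
            then "\x1b[93mc\x1b[0m".toList else ['-']]) := by
    funext out i
    dsimp only
    by_cases h : PySem.List.pyGetD G i ' ' = PySem.List.pyGetD S i ' '
    · rw [if_pos h, if_pos h]
    · rw [if_neg h, if_neg h]
  rw [hbody, PySem.List.foldl_append_singleton_eq_map, List.nil_append,
      PySem.List.pyRange_zero_natCast, List.map_map]
  apply List.map_congr_left
  intro j hj
  simp only [List.mem_range] at hj
  simp only [Function.comp]
  rw [PySem.List.pyGetD_natCast G j ' ', PySem.List.pyGetD_natCast S j ' ']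
  have havail : ((List.range S.length).map (fun (k : ℕ) => (k : Int))).foldl
      (fun (acc : Int) j' =>
        if PySem.List.pyGetD S j' ' ' = G.getD j ' ' ∧
           PySem.List.pyGetD G j' ' ' ≠ PySem.List.pyGetD S j' ' ' then acc + 1 else acc) 0
      = (pvAvail S G (G.getD j ' ') : Int) := by
    rw [PySem.List.foldl_ite_add_one, List.countP_map]
    unfold pvAvail
    rw [List.countP_congr (q := fun j' => decide (S.getD j' ' ' = G.getD j ' ' ∧ G.getD j' ' ' ≠ S.getD j' ' '))
        (by intro x _; simp [Function.comp, PySem.List.pyGetD_natCast])]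
    simp
  have hused : (PySem.List.pyRange 0 ((j : ℕ) : Int)).foldl
      (fun (acc : Int) j' =>
        if PySem.List.pyGetD G j' ' ' = G.getD j ' ' ∧
           PySem.List.pyGetD G j' ' ' ≠ PySem.List.pyGetD S j' ' ' then acc + 1 else acc) 0
      = (pvUsed S G j (G.getD j ' ') : Int) := by
    rw [PySem.List.foldl_ite_add_one, PySem.List.pyRange_zero_natCast, List.countP_map]
    unfold pvUsed
    rw [List.countP_congr (q := fun j' => decide (G.getD j' ' ' = G.getD j ' ' ∧ G.getD j' ' ' ≠ S.getD j' ' '))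
        (by intro x _; simp [Function.comp, PySem.List.pyGetD_natCast])]
    simp
  by_cases h : G.getD j ' ' = S.getD j ' '
  · simp only [if_pos h]
    unfold pvFinal pvColor
    rw [if_pos h, if_pos rfl]
  · simp only [if_neg h]
    rw [hused, havail]
    unfold pvFinal pvColor
    rw [if_neg h]
    by_cases hlt : pvUsed S G j (G.getD j ' ') < pvAvail S G (G.getD j ' ')
    · rw [if_pos (by exact_mod_cast hlt), if_pos hlt, if_neg (by decide), if_pos rfl]
    · rw [if_neg (by exact_mod_cast hlt), if_neg hlt, if_neg (by decide), if_neg (by decide)]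

-- ===== VERDICT (by name: the statement is the Claim_ definition above) =====
theorem generateHint_spec : Claim_equal_generateHint := by
  intro secret guess _hDom hPre
  unfold Spec_generateHint generateHint generateHint_alt
  dsimp only
  have hlen : (PySem.Chars.lower secret.toList).length ≤ (PySem.Chars.lower guess.toList).length := by
    simpa [PySem.Chars.lower] using hPre
  set S := PySem.Chars.lower secret.toList with hS
  set G := PySem.Chars.lower guess.toList with hG
  have hrep : List.replicate S.length '-' = (List.range S.length).map (fun _ => '-') := by
    simp
  rw [hrep]
  obtain ⟨h1, h2⟩ := pvGreenLoop S G hlen S.length 0 (by omega) (fun _ => '-')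
    (S.foldl (fun (d : PySem.Dict Char Int) ch =>
      if d.contains ch then d.modify ch 0 (· + 1) else d.insert ch 1) PySem.Dict.empty)
  simp only [Nat.cast_zero] at h1 h2
  have hmap : (List.range S.length).map
      (fun j => if 0 ≤ j ∧ G.getD j ' ' = S.getD j ' ' then 'C' else (fun _ => '-') j)
      = (List.range S.length).map (fun j => if j < 0 then pvFinal S G j else pvGreen S G j) := by
    apply List.map_congr_left
    intro j _
    have h0 : ¬ (j < 0) := by omega
    rw [if_neg h0]
    unfold pvGreen
    by_cases hgr : G.getD j ' ' = S.getD j ' '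
    · rw [if_pos (show (0 ≤ j ∧ G.getD j ' ' = S.getD j ' ') from ⟨Nat.zero_le j, hgr⟩), if_pos hgr]
    · rw [if_neg (show ¬ (0 ≤ j ∧ G.getD j ' ' = S.getD j ' ') from by rintro ⟨_, h⟩; exact hgr h),
          if_neg hgr]
  have hpair : ((PySem.List.pyRange 0 (S.length : Int)).foldl
      (fun (st : List Char × PySem.Dict Char Int) i =>
        if PySem.List.pyGetD G i ' ' = PySem.List.pyGetD S i ' ' then
          (PySem.List.pySetD st.1 i 'C',
           st.2.modify (PySem.List.pyGetD G i ' ') 0 (· - 1))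
        else st) ((List.range S.length).map (fun _ => '-'),
          S.foldl (fun (d : PySem.Dict Char Int) ch =>
            if d.contains ch then d.modify ch 0 (· + 1) else d.insert ch 1)
            PySem.Dict.empty))
      = ((List.range S.length).map (fun j => if j < 0 then pvFinal S G j else pvGreen S G j),
         ((PySem.List.pyRange 0 (S.length : Int)).foldl
      (fun (st : List Char × PySem.Dict Char Int) i =>
        if PySem.List.pyGetD G i ' ' = PySem.List.pyGetD S i ' ' then
          (PySem.List.pySetD st.1 i 'C',
           st.2.modify (PySem.List.pyGetD G i ' ') 0 (· - 1))
        else st) ((List.range S.length).map (fun _ => '-'),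
          S.foldl (fun (d : PySem.Dict Char Int) ch =>
            if d.contains ch then d.modify ch 0 (· + 1) else d.insert ch 1)
            PySem.Dict.empty)).2) := by
    apply Prod.ext
    · rw [h1, hmap]
    · rfl
  rw [hpair]
  have hd0 : ∀ c,
      ((PySem.List.pyRange 0 (S.length : Int)).foldl
        (fun (st : List Char × PySem.Dict Char Int) i =>
          if PySem.List.pyGetD G i ' ' = PySem.List.pyGetD S i ' ' then
            (PySem.List.pySetD st.1 i 'C',
             st.2.modify (PySem.List.pyGetD G i ' ') 0 (· - 1))
          else st) ((List.range S.length).map (fun _ => '-'),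
            S.foldl (fun (d : PySem.Dict Char Int) ch =>
              if d.contains ch then d.modify ch 0 (· + 1) else d.insert ch 1)
              PySem.Dict.empty)).2.getD c 0
      = max ((pvAvail S G c : Int) - (pvUsed S G 0 c : Int)) 0 := by
    intro c
    rw [h2 c]
    rw [pvBuild_count]
    have hempty : (PySem.Dict.empty : PySem.Dict Char Int).getD c 0 = 0 := by
      simp [PySem.Dict.getD, PySem.Dict.get?, PySem.Dict.empty]
    rw [hempty, List.drop_zero, pvCount_eq_countP_range]
    have hsplit := pvCountP_split (List.range S.length)
      (fun j => S.getD j ' ' = c) (fun j => G.getD j ' ' = S.getD j ' ')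
    have hu : pvUsed S G 0 c = 0 := by unfold pvUsed; simp
    unfold pvAvail
    rw [hu]
    simp only [ne_eq] at hsplit ⊢
    omega
  have hyellow := pvYellowLoop S G hlen S.length 0 (by omega) _ hd0
  simp only [Nat.cast_zero] at hyellow
  rw [hyellow, pvColor_eq, List.nil_append, List.map_map, pvBList S G hlen]
  rfl
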